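-- pv_equiv track=rewrite | github.com/NazarioJL/advent_of_code | advent_of_code/solutions/year2025/day_06.py | get_nums_part_2
-- ===== SOURCE A (Python) =====
-- from collections import defaultdict
--
-- def get_nums_part_2(data: list[str]) -> list[list[int]]:
--     group = 0
--     group_nums: dict[int, list[int]] = defaultdict(list)
--     # makes assumption all lines have same number of chars
--     cols = len(data[0])
--     rows = len(data)
--
--     for col in range(cols):
--         curr_num = 0
--         found_num = False
--         for row in range(rows):
--             if (cell := data[row][col]).isdigit():
--                 curr_num *= 10
--                 curr_num += int(cell)
--                 found_num = True
--         if found_num: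
--             group_nums[group].append(curr_num)
--         else:
--             group += 1
--
--     return [v for v in group_nums.values()]
-- ===== SOURCE B (Python) =====
-- def _parse_col(data, rows, col):
--     num = 0
--     found = False
--     for row in range(rows):
--         cell = data[row][col]
--         if cell.isdigit():
--             num = num * 10 + int(cell)
--             found = True
--     return (num, found)
--
--
-- def get_nums_part_2(data: list[str]) -> list[list[int]]:
--     cols = len(data[0])
--     rows = len(data)
--     parsed = [_parse_col(data, rows, col) for col in range(cols)]
--     out = []
--     i = 0
--     while i < cols:
--         if parsed[i][1]:
--             run = []
--             while i < cols and parsed[i][1]: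
--                 run.append(parsed[i][0])
--                 i += 1
--             out.append(run)
--         else:
--             i += 1
--     return out
-- ===== Notes on version B (the rewrite author's own statement) =====
-- stated objective: alternative
-- what changed: A makes one pass threading a group counter through a defaultdict; B first parses every column into a flat (number, found_digit) list and then splits that list into consecutive found-runs with an index loop, using no dict at all.
import Mathlib
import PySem

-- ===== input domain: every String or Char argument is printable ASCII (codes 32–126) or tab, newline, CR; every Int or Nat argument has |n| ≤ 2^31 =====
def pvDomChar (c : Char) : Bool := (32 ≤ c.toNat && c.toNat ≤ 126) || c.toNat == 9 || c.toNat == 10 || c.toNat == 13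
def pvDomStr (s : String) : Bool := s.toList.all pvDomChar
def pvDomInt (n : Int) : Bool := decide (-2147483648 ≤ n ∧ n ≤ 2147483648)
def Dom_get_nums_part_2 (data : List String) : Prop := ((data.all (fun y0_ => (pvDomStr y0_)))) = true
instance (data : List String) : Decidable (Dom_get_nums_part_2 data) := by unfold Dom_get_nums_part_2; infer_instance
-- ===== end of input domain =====

-- B replaces A's single pass threading a group counter through a defaultdict by a parse-then-split
-- decomposition without any dict (objective: alternative); equal return value on all of Pre_.

-- ===== PORT A =====
-- Literal port of A. data[0], data[row][col] are pyGetD with an arbitrary default (' ' is not a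
-- digit): Python raises IndexError exactly there, and Pre_ excludes those inputs.
-- int(cell) for an ASCII digit character is its code minus 48.
def get_nums_part_2 (data : List String) : List (List Int) :=
  let cols : Int := PySem.Str.len (PySem.List.pyGetD data 0 "")
  let rows : Int := (data.length : Int)
  let st := (PySem.List.pyRange 0 cols 1).foldl
    (fun (st : Int × PySem.Dict Int (List Int)) col =>
      let inner := (PySem.List.pyRange 0 rows 1).foldl
        (fun (p : Int × Bool) row =>
          let cell := PySem.List.pyGetD (PySem.List.pyGetD data row "").toList col ' '
          if PySem.Chars.isdigit cell then (p.1 * 10 + ((cell.toNat : Int) - 48), true) else p)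
        (0, false)
      if inner.2 then (st.1, st.2.modify st.1 [] (· ++ [inner.1]))
      else (st.1 + 1, st.2))
    (0, PySem.Dict.empty)
  st.2.values

-- ===== PORT B =====
-- _parse_col from Source B (same IndexError domain as A: index-based access, default only off-Pre_).
def pvParseCol (data : List String) (rows : Int) (col : Int) : Int × Bool :=
  (PySem.List.pyRange 0 rows 1).foldl
    (fun (p : Int × Bool) row =>
      let cell := PySem.List.pyGetD (PySem.List.pyGetD data row "").toList col ' '
      if PySem.Chars.isdigit cell then (p.1 * 10 + ((cell.toNat : Int) - 48), true) else p)
    (0, false)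

-- Source B's outer while loop: consume one run of found-columns at a time (takeWhile/dropWhile is the
-- list transcription of the index-based inner while loop).
def pvGather : List (Int × Bool) → List (List Int)
  | [] => []
  | p :: rest =>
      if p.2 then
        (p.1 :: (rest.takeWhile (fun q => q.2)).map (fun q => q.1)) ::
          pvGather (rest.dropWhile (fun q => q.2))
      else pvGather rest
termination_by l => l.length
decreasing_by
  · simp only [List.length_cons]
    exact Nat.lt_succ_of_le (List.length_dropWhile_le _ _)
  · simp

def get_nums_part_2_alt (data : List String) : List (List Int) :=
  let cols : Int := PySem.Str.len (PySem.List.pyGetD data 0 "")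
  let rows : Int := (data.length : Int)
  pvGather ((PySem.List.pyRange 0 cols 1).map (pvParseCol data rows))

-- ===== PRECONDITION & SPEC =====
-- Pre_ excludes exactly the inputs where Python A raises IndexError: empty data (data[0]) and
-- ragged input with some line shorter than the first (data[row][col]).
def Pre_get_nums_part_2 (data : List String) : Prop :=
  data ≠ [] ∧ ∀ s ∈ data, PySem.Str.len (data.headD "") ≤ PySem.Str.len s
instance (data : List String) : Decidable (Pre_get_nums_part_2 data) := by
  unfold Pre_get_nums_part_2; infer_instance

def pvWitness_get_nums_part_2 : List String := ["12 3", "4  5"]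

def Spec_get_nums_part_2 (data : List String) (out : List (List Int)) : Prop := out = get_nums_part_2_alt data
instance (data : List String) (out : List (List Int)) : Decidable (Spec_get_nums_part_2 data out) := by unfold Spec_get_nums_part_2; infer_instance

-- ===== CLAIM (what is proved, stated in full; the proofs are below) =====
def Claim_equal_get_nums_part_2 : Prop := ∀ (data : List String), Dom_get_nums_part_2 data → Pre_get_nums_part_2 data → Spec_get_nums_part_2 data (get_nums_part_2 data)

-- ===== LEMMAS AND PROOFS =====

-- A's loop body as a step on one parsed column (used only by the proofs).
def pvStep (st : Int × PySem.Dict Int (List Int)) (p : Int × Bool) :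
    Int × PySem.Dict Int (List Int) :=
  if p.2 then (st.1, st.2.modify st.1 [] (· ++ [p.1])) else (st.1 + 1, st.2)

-- the still-open group of B's inner while loop, as a function of the remaining parsed columns
def pvH : List (Int × Bool) → List Int → List (List Int)
  | [], cur => [cur]
  | p :: rest, cur => if p.2 then pvH rest (cur ++ [p.1]) else cur :: pvGather rest

theorem pvH_eq (ps : List (Int × Bool)) (cur : List Int) :
    pvH ps cur = (cur ++ (ps.takeWhile (fun q => q.2)).map (fun q => q.1)) ::
      pvGather (ps.dropWhile (fun q => q.2)) := by
  induction ps generalizing cur with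
  | nil => simp [pvH, pvGather]
  | cons p rest ih =>
    by_cases hb : p.2
    · simp [pvH, hb, ih]
    · simp only [Bool.not_eq_true] at hb
      simp [pvH, pvGather, hb]

theorem pvGather_true (n : Int) (rest : List (Int × Bool)) :
    pvGather ((n, true) :: rest) = pvH rest [n] := by
  rw [pvGather, pvH_eq]; simp

theorem pv_not_contains {d : PySem.Dict Int (List Int)} {g : Int}
    (hlt : ∀ k ∈ d.keys, k < g) : d.contains g = false := by
  rw [PySem.Dict.contains_eq_decide_mem_keys]
  simp only [decide_eq_false_iff_not]
  intro hmem
  exact absurd (hlt g hmem) (lt_irrefl g)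

theorem pv_values_insert {d : PySem.Dict Int (List Int)} {g : Int} (cur : List Int)
    (hc : d.contains g = false) :
    (d.insert g cur).values = d.values ++ [cur] := by
  simp [PySem.Dict.values, PySem.Dict.items_insert_of_not_contains d cur hc]

theorem pv_main (ps : List (Int × Bool)) (g : Int) (d : PySem.Dict Int (List Int))
    (hnd : d.keys.Nodup) (hlt : ∀ k ∈ d.keys, k < g) :
    ((ps.foldl pvStep (g, d)).2.values = d.values ++ pvGather ps)
    ∧ (∀ cur, (ps.foldl pvStep (g, d.insert g cur)).2.values = d.values ++ pvH ps cur) := by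
  induction ps generalizing g d with
  | nil =>
    refine ⟨by simp [pvGather], fun cur => ?_⟩
    simp [pvH, pv_values_insert cur (pv_not_contains hlt)]
  | cons p rest ih =>
    obtain ⟨n, b⟩ := p
    have hc : d.contains g = false := pv_not_contains hlt
    constructor
    · cases b with
      | true =>
        have hstep : pvStep (g, d) (n, true) = (g, d.insert g [n]) := by
          simp [pvStep, PySem.Dict.modify, PySem.Dict.getD_of_not_contains d _ hc]
        rw [List.foldl_cons, hstep, (ih g d hnd hlt).2 [n], pvGather_true]
      | false =>
        have hlt' : ∀ k ∈ d.keys, k < g + 1 := fun k hk => lt_trans (hlt k hk) (by omega)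
        have hstep : pvStep (g, d) (n, false) = (g + 1, d) := by simp [pvStep]
        rw [List.foldl_cons, hstep, (ih (g + 1) d hnd hlt').1]
        simp [pvGather]
    · intro cur
      cases b with
      | true =>
        have hstep : pvStep (g, d.insert g cur) (n, true) = (g, d.insert g (cur ++ [n])) := by
          simp [pvStep, PySem.Dict.modify, PySem.Dict.getD_insert_self,
            PySem.Dict.insert_insert_self]
        rw [List.foldl_cons, hstep, (ih g d hnd hlt).2 (cur ++ [n])]
        simp [pvH]
      | false =>
        have hnd' : (d.insert g cur).keys.Nodup := PySem.Dict.nodup_keys_insert d g cur hnd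
        have hlt' : ∀ k ∈ (d.insert g cur).keys, k < g + 1 := by
          intro k hk
          rw [PySem.Dict.keys_insert_of_not_contains d cur hc] at hk
          rcases List.mem_append.mp hk with h | h
          · exact lt_trans (hlt k h) (by omega)
          · simp at h; omega
        have hstep : pvStep (g, d.insert g cur) (n, false) = (g + 1, d.insert g cur) := by
          simp [pvStep]
        rw [List.foldl_cons, hstep, (ih (g + 1) (d.insert g cur) hnd' hlt').1,
          pv_values_insert cur hc]
        simp [pvH]

-- ===== VERDICT (by name: the statement is the Claim_ definition above) =====
theorem get_nums_part_2_spec : Claim_equal_get_nums_part_2 := by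
  intro data _ _
  unfold Spec_get_nums_part_2 get_nums_part_2 get_nums_part_2_alt
  have h := (pv_main ((PySem.List.pyRange 0 (PySem.Str.len (PySem.List.pyGetD data 0 "")) 1).map
      (pvParseCol data (data.length : Int))) 0 PySem.Dict.empty
      PySem.Dict.nodup_keys_empty (by simp [PySem.Dict.keys_empty])).1
  rw [List.foldl_map] at h
  simpa [PySem.Dict.values, PySem.Dict.empty, pvStep, pvParseCol] using h
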